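-- pv_equiv track=rewrite | github.com/DARSHAN-V-G/social_networks_community_hiding | hs_algorithm.py | compute_rho
-- ===== SOURCE A (Python) =====
-- from collections import deque
--
-- def compute_rho(community, adj):
--     dist = 0
--     for source in community:
--         visited={source : 0}
--         queue=deque([source])
--         while queue :
--             current=queue.popleft()
--             cur_dist=visited[current]
--             for n in adj[current]:
--                 if n in community and n not in visited:
--                     visited[n]=cur_dist + 1
--                     queue.append(n)
--         for n,d in visited.items():
--             if n!=source:
--                 dist+=d
--     return dist
-- ===== SOURCE B (Python) =====
-- def compute_rho(community, adj):
--     comm = set(community)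
--     total = 0
--     for source in community:
--         dist = {source: 0}
--         for _ in range(len(community)):
--             changed = False
--             for u in community:
--                 if u in dist:
--                     du = dist[u]
--                     for v in adj[u]:
--                         if v in comm and (v not in dist or du + 1 < dist[v]):
--                             dist[v] = du + 1
--                             changed = True
--             if not changed:
--                 break
--         total += sum(d for n, d in dist.items() if n != source)
--     return total
-- ===== Notes on version B (the rewrite author's own statement) =====
-- stated objective: alternative
-- what changed: Per-source BFS with a queue and visited dict is replaced by per-source Bellman-Ford edge relaxation: a distance dict is repeatedly improved by relaxing every community edge for up to len(community) rounds (with early exit when a round changes nothing), then the values are summed.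
import Mathlib
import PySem

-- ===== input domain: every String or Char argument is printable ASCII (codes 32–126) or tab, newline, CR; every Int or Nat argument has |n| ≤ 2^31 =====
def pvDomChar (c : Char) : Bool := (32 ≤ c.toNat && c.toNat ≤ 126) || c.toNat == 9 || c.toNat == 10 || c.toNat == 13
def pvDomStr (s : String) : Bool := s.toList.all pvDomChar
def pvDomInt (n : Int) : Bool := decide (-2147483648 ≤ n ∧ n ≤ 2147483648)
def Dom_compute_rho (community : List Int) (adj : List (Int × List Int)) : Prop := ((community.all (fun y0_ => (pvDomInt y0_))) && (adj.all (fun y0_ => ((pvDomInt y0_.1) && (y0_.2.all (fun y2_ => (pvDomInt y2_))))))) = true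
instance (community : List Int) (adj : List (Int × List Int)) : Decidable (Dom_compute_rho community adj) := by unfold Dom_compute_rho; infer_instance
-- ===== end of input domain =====

-- B re-implements A's per-source queue BFS as per-source Bellman-Ford edge relaxation:
-- a distance dict is repeatedly improved by relaxing every community edge, up to
-- len(community) rounds with early exit when a round changes nothing; same value.

-- ===== PORT A =====
-- adj[u] : neighbour-list lookup in the adjacency dict (both Pythons do exactly this lookup)
def pvNbrs (adj : List (Int × List Int)) (u : Int) : List Int :=
  (PySem.Dict.mk adj).getD u []

-- body of A's inner 'for n in adj[current]' loop (c = cur_dist)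
def pvStepA (community : List Int) (c : Int)
    (st : PySem.Dict Int Int × List Int) (n : Int) : PySem.Dict Int Int × List Int :=
  if community.contains n && !(st.1.contains n) then
    (st.1.insert n (c + 1), st.2 ++ [n])
  else st

-- A's 'while queue' loop; fuel only makes the recursion structural (2*|community|+2 always suffices)
def pvBfsA (community : List Int) (adj : List (Int × List Int)) :
    Nat → PySem.Dict Int Int → List Int → PySem.Dict Int Int
  | 0, visited, _ => visited
  | fuel + 1, visited, queue =>
    match queue with
    | [] => visited
    | current :: rest =>
      let curDist := visited.getD current 0
      let st := (pvNbrs adj current).foldl (pvStepA community curDist) (visited, rest)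
      pvBfsA community adj fuel st.1 st.2

def compute_rho (community : List Int) (adj : List (Int × List Int)) : Int :=
  community.foldl (fun dist source =>
    let visited := pvBfsA community adj (2 * community.length + 2)
      ((PySem.Dict.empty).insert source 0) [source]
    visited.items.foldl (fun s nd => if nd.1 ≠ source then s + nd.2 else s) dist) 0

-- ===== PORT B =====
-- body of B's innermost relaxation 'for v in adj[u]' (du = dist[u] read before the loop; flag = changed)
def pvRelaxV (comm : PySem.Set Int) (du : Int)
    (st : PySem.Dict Int Int × Bool) (v : Int) : PySem.Dict Int Int × Bool :=
  if PySem.Set.contains comm v && (!(st.1.contains v) || decide (du + 1 < st.1.getD v 0)) then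
    (st.1.insert v (du + 1), true)
  else st

-- body of B's 'for u in community' loop
def pvRelaxU (comm : PySem.Set Int) (adj : List (Int × List Int))
    (st : PySem.Dict Int Int × Bool) (u : Int) : PySem.Dict Int Int × Bool :=
  if st.1.contains u then (pvNbrs adj u).foldl (pvRelaxV comm (st.1.getD u 0)) st else st

-- one relaxation round (changed starts False)
def pvRound (community : List Int) (comm : PySem.Set Int) (adj : List (Int × List Int))
    (dist : PySem.Dict Int Int) : PySem.Dict Int Int × Bool :=
  community.foldl (pvRelaxU comm adj) (dist, false)

-- B's 'for _ in range(len(community)) … if not changed: break' loop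
def pvBF (community : List Int) (comm : PySem.Set Int) (adj : List (Int × List Int)) :
    Nat → PySem.Dict Int Int → PySem.Dict Int Int
  | 0, dist => dist
  | fuel + 1, dist =>
    let st := pvRound community comm adj dist
    if st.2 then pvBF community comm adj fuel st.1 else st.1

def compute_rho_alt (community : List Int) (adj : List (Int × List Int)) : Int :=
  let comm := PySem.Set.ofList community
  community.foldl (fun total source =>
    let dist := pvBF community comm adj community.length ((PySem.Dict.empty).insert source 0)
    total + dist.items.foldl (fun s nd => if nd.1 ≠ source then s + nd.2 else s) 0) 0

-- ===== PRECONDITION & SPEC =====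
-- Pre_ excludes exactly the inputs where Python A raises KeyError: a community member missing
-- from the adjacency dict (every source is dequeued as 'current', so 'adj[current]' raises).
def Pre_compute_rho (community : List Int) (adj : List (Int × List Int)) : Prop :=
  ∀ c ∈ community, (PySem.Dict.mk adj).contains c = true
instance (community : List Int) (adj : List (Int × List Int)) : Decidable (Pre_compute_rho community adj) := by unfold Pre_compute_rho; infer_instance

def pvWitness_compute_rho : List Int × (List (Int × List Int)) := ([1, 2], [(1, [2]), (2, [1, 3])])

def Spec_compute_rho (community : List Int) (adj : List (Int × List Int)) (out : Int) : Prop := out = compute_rho_alt community adj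
instance (community : List Int) (adj : List (Int × List Int)) (out : Int) : Decidable (Spec_compute_rho community adj out) := by unfold Spec_compute_rho; infer_instance

-- ===== CLAIM (what is proved, stated in full; the proofs are below) =====
def Claim_equal_compute_rho : Prop := ∀ (community : List Int) (adj : List (Int × List Int)), Dom_compute_rho community adj → Pre_compute_rho community adj → Spec_compute_rho community adj (compute_rho community adj)

-- ===== LEMMAS AND PROOFS =====

-- proof-side abbreviations -------------------------------------------------

-- sum of the distances A's final pass adds for one source
def pvCondSum (source : Int) (v : PySem.Dict Int Int) : Int :=
  ((v.items.filter (fun nd => nd.1 != source)).map Prod.snd).sum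

-- proof-side level-synchronous BFS, the common reference both ports are reduced to
def pvStepB (comm : PySem.Set Int)
    (st : PySem.Set Int × List Int) (v : Int) : PySem.Set Int × List Int :=
  if PySem.Set.contains comm v && !(PySem.Set.contains st.1 v) then
    (PySem.Set.add st.1 v, st.2 ++ [v])
  else st

def pvBfsB (comm : PySem.Set Int) (adj : List (Int × List Int)) :
    Nat → PySem.Set Int → List Int → Int → Int → Int
  | 0, _, _, _, total => total
  | fuel + 1, seen, frontier, d, total =>
    if frontier.isEmpty then total
    else
      let st := frontier.foldl
        (fun st u => (pvNbrs adj u).foldl (pvStepB comm) st) (seen, ([] : List Int))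
      pvBfsB comm adj fuel st.1 st.2 (d + 1) (total + (d + 1) * (st.2.length : Int))

-- one whole BFS level, A side: fold A's per-pop step over the frontier, new nodes into an accumulator
def pvALevel (community : List Int) (adj : List (Int × List Int))
    (v : PySem.Dict Int Int) (front : List Int) : PySem.Dict Int Int × List Int :=
  front.foldl (fun st u => (pvNbrs adj u).foldl (pvStepA community (st.1.getD u 0)) st) (v, [])

-- one whole BFS level, B side (this is literally the body of pvBfsB)
def pvBLevel (comm : PySem.Set Int) (adj : List (Int × List Int))
    (s : PySem.Set Int) (front : List Int) : PySem.Set Int × List Int :=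
  front.foldl (fun st u => (pvNbrs adj u).foldl (pvStepB comm) st) (s, [])

-- number of still-undiscovered candidate nodes (bounds the remaining work)
def pvFree (community : List Int) (source : Int) (v : PySem.Dict Int Int) : Nat :=
  (((source :: community).dedup).filter (fun x => !(v.contains x))).length

-- generic: a fold whose second component only ever appends --------------------------------

theorem pvFoldlAcc {σ : Type} (F : σ → Int → σ) (G : σ → Int → List Int)
    (f : σ × List Int → Int → σ × List Int)
    (hf : ∀ v l x, f (v, l) x = (F v x, l ++ G v x)) :
    ∀ (ns : List Int) (v : σ) (l : List Int),
      ns.foldl f (v, l) = ((ns.foldl f (v, [])).1, l ++ (ns.foldl f (v, [])).2) := by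
  intro ns
  induction ns with
  | nil => intro v l; simp
  | cons n t ih =>
    intro v l
    simp only [List.foldl_cons, hf]
    rw [ih (F v n) (l ++ G v n), ih (F v n) (([] : List Int) ++ G v n)]
    simp [List.append_assoc]

theorem pvStepA_shape (community : List Int) (c : Int) (v : PySem.Dict Int Int) (l : List Int)
    (n : Int) :
    pvStepA community c (v, l) n =
      ((pvStepA community c (v, []) n).1, l ++ (pvStepA community c (v, []) n).2) := by
  unfold pvStepA
  cases h : (community.contains n && !(v.contains n)) <;> simp_all

theorem pvStepB_shape (comm : PySem.Set Int) (s : PySem.Set Int) (l : List Int) (n : Int) :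
    pvStepB comm (s, l) n = ((pvStepB comm (s, []) n).1, l ++ (pvStepB comm (s, []) n).2) := by
  unfold pvStepB
  cases h : (PySem.Set.contains comm n && !(PySem.Set.contains s n)) <;> simp_all

-- inner (per-node) folds with empty accumulator
def pvAIn (community : List Int) (c : Int) (ns : List Int) (v : PySem.Dict Int Int) :
    PySem.Dict Int Int × List Int :=
  ns.foldl (pvStepA community c) (v, [])

def pvBIn (comm : PySem.Set Int) (ns : List Int) (s : PySem.Set Int) :
    PySem.Set Int × List Int :=
  ns.foldl (pvStepB comm) (s, [])

theorem pvAInAcc (community : List Int) (c : Int) (ns : List Int) (v : PySem.Dict Int Int)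
    (l : List Int) :
    ns.foldl (pvStepA community c) (v, l) =
      ((pvAIn community c ns v).1, l ++ (pvAIn community c ns v).2) :=
  pvFoldlAcc (fun v n => (pvStepA community c (v, []) n).1)
    (fun v n => (pvStepA community c (v, []) n).2) _
    (fun v l n => pvStepA_shape community c v l n) ns v l

theorem pvBInAcc (comm : PySem.Set Int) (ns : List Int) (s : PySem.Set Int) (l : List Int) :
    ns.foldl (pvStepB comm) (s, l) = ((pvBIn comm ns s).1, l ++ (pvBIn comm ns s).2) :=
  pvFoldlAcc (fun s n => (pvStepB comm (s, []) n).1) (fun s n => (pvStepB comm (s, []) n).2) _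
    (fun s l n => pvStepB_shape comm s l n) ns s l

theorem pvALevelAcc (community : List Int) (adj : List (Int × List Int))
    (front : List Int) (v : PySem.Dict Int Int) (l : List Int) :
    front.foldl (fun st u => (pvNbrs adj u).foldl (pvStepA community (st.1.getD u 0)) st) (v, l) =
      ((pvALevel community adj v front).1, l ++ (pvALevel community adj v front).2) :=
  pvFoldlAcc (fun v u => (pvAIn community (v.getD u 0) (pvNbrs adj u) v).1)
    (fun v u => (pvAIn community (v.getD u 0) (pvNbrs adj u) v).2) _
    (fun v l u => pvAInAcc community (v.getD u 0) (pvNbrs adj u) v l) front v l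

theorem pvBLevelAcc (comm : PySem.Set Int) (adj : List (Int × List Int))
    (front : List Int) (s : PySem.Set Int) (l : List Int) :
    front.foldl (fun st u => (pvNbrs adj u).foldl (pvStepB comm) st) (s, l) =
      ((pvBLevel comm adj s front).1, l ++ (pvBLevel comm adj s front).2) :=
  pvFoldlAcc (fun s u => (pvBIn comm (pvNbrs adj u) s).1)
    (fun s u => (pvBIn comm (pvNbrs adj u) s).2) _
    (fun s l u => pvBInAcc comm (pvNbrs adj u) s l) front s l

-- the invariant pack carried from state v to result (ra on A's side, rb on the level-BFS side);
-- c + 1 is the distance written for the newly discovered nodes ra.2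
def pvPack (community : List Int) (source c : Int) (v : PySem.Dict Int Int)
    (ra : PySem.Dict Int Int × List Int) (rb : PySem.Set Int × List Int) : Prop :=
  rb.1 = ra.1.keys ∧ rb.2 = ra.2 ∧ ra.1.keys = v.keys ++ ra.2 ∧ ra.1.keys.Nodup ∧
  (∀ x ∈ ra.2, community.contains x = true) ∧
  (∀ x, v.contains x = true → ra.1.getD x 0 = v.getD x 0) ∧
  (∀ x ∈ ra.2, ra.1.getD x 0 = c + 1) ∧
  pvCondSum source ra.1 = pvCondSum source v + (c + 1) * ra.2.length ∧
  ra.1.contains source = true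

theorem pvCondSum_insert (source n c : Int) (v : PySem.Dict Int Int)
    (hn : v.contains n = false) (hne : n ≠ source) :
    pvCondSum source (v.insert n c) = pvCondSum source v + c := by
  unfold pvCondSum
  rw [PySem.Dict.items_insert_of_not_contains v c hn]
  simp [List.filter_append, List.sum_append, hne, bne]

theorem pvInner (community : List Int) (source c : Int) (ns : List Int) :
    ∀ (v : PySem.Dict Int Int) (s : PySem.Set Int),
      v.keys = s → v.keys.Nodup → v.contains source = true →
      pvPack community source c v (pvAIn community c ns v)
        (pvBIn (PySem.Set.ofList community) ns s) := by
  induction ns with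
  | nil =>
    intro v s hk hnd hsrc
    exact ⟨hk.symm, rfl, by simp [pvAIn], hnd, by simp [pvAIn], fun x _ => rfl,
      by simp [pvAIn], by simp [pvAIn], hsrc⟩
  | cons n t ih =>
    intro v s hk hnd hsrc
    have hcb : PySem.Set.contains s n = v.contains n := by
      rw [Bool.eq_iff_iff, PySem.Dict.contains_iff_mem_keys, hk]; simp [pysem]
    have hcc : PySem.Set.contains (PySem.Set.ofList community) n = community.contains n := by
      rw [Bool.eq_iff_iff]; simp [pysem]
    unfold pvAIn pvBIn
    simp only [List.foldl_cons]
    cases hcond : (community.contains n && !(v.contains n)) with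
    | false =>
      have hA : pvStepA community c (v, ([] : List Int)) n = (v, []) := by
        unfold pvStepA; simp only [hcond]; simp
      have hB : pvStepB (PySem.Set.ofList community) (s, ([] : List Int)) n = (s, []) := by
        have hc : (PySem.Set.contains (PySem.Set.ofList community) n &&
            !(PySem.Set.contains s n)) = false := by rw [hcc, hcb]; exact hcond
        unfold pvStepB; simp only [hc]; simp
      rw [hA, hB]
      exact ih v s hk hnd hsrc
    | true =>
      have hcond' := hcond
      simp only [Bool.and_eq_true, Bool.not_eq_true'] at hcond'
      obtain ⟨hmemc, hvn⟩ := hcond'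
      have hsn : PySem.Set.contains s n = false := by rw [hcb]; exact hvn
      have hA : pvStepA community c (v, ([] : List Int)) n = (v.insert n (c + 1), [n]) := by
        unfold pvStepA; simp only [hcond]; simp
      have hB : pvStepB (PySem.Set.ofList community) (s, ([] : List Int)) n
          = (s ++ [n], [n]) := by
        have hc : (PySem.Set.contains (PySem.Set.ofList community) n &&
            !(PySem.Set.contains s n)) = true := by rw [hcc, hcb]; exact hcond
        have hns : n ∉ s := by simpa [pysem] using hsn
        unfold pvStepB; simp only [hc]; simp [PySem.Set.add, hns, pysem]
      rw [hA, hB, pvAInAcc community c t (v.insert n (c + 1)) [n],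
        pvBInAcc (PySem.Set.ofList community) t (s ++ [n]) [n]]
      have hkins := PySem.Dict.keys_insert_of_not_contains v (c + 1) hvn
      have hk' : (v.insert n (c + 1)).keys = (s ++ [n] : List Int) := by
        rw [hkins, hk]
      have hnd' := PySem.Dict.nodup_keys_insert v n (c + 1) hnd
      have hsrc' : (v.insert n (c + 1)).contains source = true := by
        simp [PySem.Dict.contains_insert, hsrc]
      obtain ⟨p1, p2, p3, p4, p5, p6, p7, p8, p9⟩ :=
        ih (v.insert n (c + 1)) (s ++ [n]) hk' hnd' hsrc'
      have hnsrc : n ≠ source := by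
        intro h; rw [h, hsrc] at hvn; exact absurd hvn (by simp)
      refine ⟨p1, by simpa using congrArg (fun l => [n] ++ l) p2, ?_, p4, ?_, ?_, ?_, ?_, p9⟩
      · show _ = v.keys ++ ([n] ++ _)
        rw [p3, hkins]; simp
      · intro x hx
        rcases List.mem_append.mp hx with hx1 | hx2
        · rw [List.mem_singleton.mp hx1]; exact hmemc
        · exact p5 x hx2
      · intro x hcx
        have hxn : x ≠ n := by
          intro h; rw [h, hvn] at hcx; exact Bool.false_ne_true hcx
        have hcx' : (v.insert n (c + 1)).contains x = true := by
          simp [PySem.Dict.contains_insert, hcx]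
        rw [p6 x hcx', PySem.Dict.getD_insert_of_ne v (c + 1) 0 hxn]
      · intro x hx
        rcases List.mem_append.mp hx with hx1 | hx2
        · rw [List.mem_singleton.mp hx1]
          rw [p6 n (PySem.Dict.contains_insert_self v n (c + 1)),
            PySem.Dict.getD_insert_self v n (c + 1) 0]
        · exact p7 x hx2
      · show pvCondSum source _ = pvCondSum source v + (c + 1) * (([n] ++ _).length : Int)
        rw [p8, pvCondSum_insert source n (c + 1) v hvn hnsrc]
        simp only [List.length_append, List.length_singleton]
        push_cast
        ring

theorem pvLevel (community : List Int) (adj : List (Int × List Int)) (source d : Int)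
    (front : List Int) :
    ∀ (v : PySem.Dict Int Int) (s : PySem.Set Int),
      v.keys = s → v.keys.Nodup → v.contains source = true →
      (∀ x ∈ front, v.contains x = true) → (∀ x ∈ front, v.getD x 0 = d) →
      pvPack community source d v (pvALevel community adj v front)
        (pvBLevel (PySem.Set.ofList community) adj s front) := by
  induction front with
  | nil =>
    intro v s hk hnd hsrc _ _
    exact ⟨hk.symm, rfl, by simp [pvALevel], hnd, by simp [pvALevel], fun x _ => rfl,
      by simp [pvALevel], by simp [pvALevel], hsrc⟩
  | cons u t ih =>
    intro v s hk hnd hsrc hfm hfv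
    have hd : v.getD u 0 = d := hfv u (by simp)
    obtain ⟨q1, q2, q3, q4, q5, q6, q7, q8, q9⟩ :=
      pvInner community source d (pvNbrs adj u) v s hk hnd hsrc
    set r := pvAIn community d (pvNbrs adj u) v with hr
    set rb := pvBIn (PySem.Set.ofList community) (pvNbrs adj u) s with hrb
    have hcont_r : ∀ x, v.contains x = true → r.1.contains x = true := by
      intro x hx
      rw [PySem.Dict.contains_iff_mem_keys] at hx ⊢
      rw [q3]; exact List.mem_append_left _ hx
    have hcont_r2 : ∀ x ∈ r.2, r.1.contains x = true := by
      intro x hx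
      rw [PySem.Dict.contains_iff_mem_keys, q3]; exact List.mem_append_right _ hx
    have hfm' : ∀ x ∈ t, r.1.contains x = true := fun x hx =>
      hcont_r x (hfm x (List.mem_cons_of_mem u hx))
    have hfv' : ∀ x ∈ t, r.1.getD x 0 = d := fun x hx => by
      rw [q6 x (hfm x (List.mem_cons_of_mem u hx))]; exact hfv x (List.mem_cons_of_mem u hx)
    obtain ⟨w1, w2, w3, w4, w5, w6, w7, w8, w9⟩ := ih r.1 rb.1 q1.symm q4 q9 hfm' hfv'
    have hAunf : pvALevel community adj v (u :: t) =
        ((pvALevel community adj r.1 t).1, r.2 ++ (pvALevel community adj r.1 t).2) := by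
      unfold pvALevel
      simp only [List.foldl_cons]
      rw [show ((v, ([] : List Int)).1.getD u 0) = d from hd]
      rw [show (pvNbrs adj u).foldl (pvStepA community d) (v, ([] : List Int)) = (r.1, r.2)
        from rfl]
      exact pvALevelAcc community adj t r.1 r.2
    have hBunf : pvBLevel (PySem.Set.ofList community) adj s (u :: t) =
        ((pvBLevel (PySem.Set.ofList community) adj rb.1 t).1,
          rb.2 ++ (pvBLevel (PySem.Set.ofList community) adj rb.1 t).2) := by
      unfold pvBLevel
      simp only [List.foldl_cons]
      rw [show (pvNbrs adj u).foldl (pvStepB (PySem.Set.ofList community))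
        (s, ([] : List Int)) = (rb.1, rb.2) from rfl]
      exact pvBLevelAcc (PySem.Set.ofList community) adj t rb.1 rb.2
    rw [hAunf, hBunf]
    refine ⟨w1, by rw [q2, w2], ?_, w4, ?_, ?_, ?_, ?_, w9⟩
    · show _ = v.keys ++ (r.2 ++ _)
      rw [w3, q3]; simp
    · intro x hx
      rcases List.mem_append.mp hx with hx1 | hx2
      · exact q5 x hx1
      · exact w5 x hx2
    · intro x hcx
      rw [w6 x (hcont_r x hcx), q6 x hcx]
    · intro x hx
      rcases List.mem_append.mp hx with hx1 | hx2
      · rw [w6 x (hcont_r2 x hx1)]; exact q7 x hx1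
      · exact w7 x hx2
    · show pvCondSum source _ = pvCondSum source v + (d + 1) * ((r.2 ++ _).length : Int)
      rw [w8, q8]
      simp only [List.length_append]
      push_cast
      ring

theorem pvBfsA_split (community : List Int) (adj : List (Int × List Int)) :
    ∀ (front pending : List Int) (v : PySem.Dict Int Int) (fa : Nat),
      front.length ≤ fa →
      pvBfsA community adj fa v (front ++ pending) =
        pvBfsA community adj (fa - front.length) (pvALevel community adj v front).1
          (pending ++ (pvALevel community adj v front).2) := by
  intro front
  induction front with
  | nil => intro pending v fa _; simp [pvALevel]
  | cons u t ihf =>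
    intro pending v fa hfa
    cases fa with
    | zero => simp at hfa
    | succ fa' =>
      have hstep : pvBfsA community adj (fa' + 1) v (u :: (t ++ pending)) =
          pvBfsA community adj fa'
            ((pvNbrs adj u).foldl (pvStepA community (v.getD u 0)) (v, t ++ pending)).1
            ((pvNbrs adj u).foldl (pvStepA community (v.getD u 0)) (v, t ++ pending)).2 := rfl
      rw [List.cons_append, hstep,
        pvAInAcc community (v.getD u 0) (pvNbrs adj u) v (t ++ pending)]
      set r := pvAIn community (v.getD u 0) (pvNbrs adj u) v with hrdef
      rw [show (t ++ pending) ++ r.2 = t ++ (pending ++ r.2) from by simp,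
        ihf (pending ++ r.2) r.1 fa' (by simpa using Nat.lt_succ_iff.mp (by simpa using hfa))]
      have hAunf : pvALevel community adj v (u :: t) =
          ((pvALevel community adj r.1 t).1, r.2 ++ (pvALevel community adj r.1 t).2) := by
        unfold pvALevel
        simp only [List.foldl_cons]
        rw [show (pvNbrs adj u).foldl
            (pvStepA community ((v, ([] : List Int)).1.getD u 0)) (v, ([] : List Int))
            = (r.1, r.2) from rfl]
        exact pvALevelAcc community adj t r.1 r.2
      rw [hAunf]
      simp

theorem pvFree_drop (community : List Int) (source : Int) (v v' : PySem.Dict Int Int)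
    (new : List Int) (hk : v'.keys = v.keys ++ new) (hnd : v'.keys.Nodup)
    (hmem : ∀ x ∈ new, community.contains x = true) :
    pvFree community source v' + new.length = pvFree community source v := by
  classical
  unfold pvFree
  set cand := (source :: community).dedup with hcand
  have hcnd : cand.Nodup := List.nodup_dedup _
  obtain ⟨hndv, hndnew, hdisj⟩ := List.nodup_append.mp (hk ▸ hnd)
  have hpred : ∀ x, (!(v'.contains x)) = (!(v.contains x) && !(new.contains x)) := by
    intro x
    have hx : v'.contains x = (v.contains x || new.contains x) := by
      rw [Bool.eq_iff_iff]
      simp [PySem.Dict.contains_iff_mem_keys, hk]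
    rw [hx, Bool.not_or]
  rw [List.filter_congr (fun x _ => hpred x)]
  set A := cand.filter (fun x => !(v.contains x)) with hA
  have hAnd : A.Nodup := hcnd.filter _
  have h1 : cand.filter (fun x => !(v.contains x) && !(new.contains x))
      = A.filter (fun x => !(new.contains x)) := by
    rw [hA, List.filter_filter]
    exact List.filter_congr (fun x _ => Bool.and_comm _ _)
  have hperm : (A.filter (fun x => new.contains x)).Perm new := by
    refine (List.perm_ext_iff_of_nodup (hAnd.filter _) hndnew).mpr ?_
    intro x
    simp only [List.mem_filter, List.contains_iff_mem, hA]
    constructor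
    · rintro ⟨_, hx⟩; exact hx
    · intro hx
      have hxc : x ∈ cand := by
        rw [hcand]
        apply List.mem_dedup.mpr
        have := hmem x hx
        simp at this
        exact List.mem_cons_of_mem source this
      have hxv : v.contains x = false := by
        rw [← Bool.not_eq_true, PySem.Dict.contains_iff_mem_keys]
        intro hmemk
        exact hdisj x hmemk x hx rfl
      exact ⟨⟨hxc, by simp [hxv]⟩, hx⟩
  have h4 : A.countP (fun x => new.contains x) = new.length := by
    rw [List.countP_eq_length_filter]
    exact hperm.length_eq
  have h3 := List.length_eq_countP_add_countP (fun x => new.contains x) (l := A)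
  have h2 : (A.filter (fun x => !(new.contains x))).length
      = A.countP (fun x => !(new.contains x)) := List.countP_eq_length_filter.symm
  have h5 : A.countP (fun a => decide ¬(new.contains a = true))
      = A.countP (fun x => !(new.contains x)) := by
    apply List.countP_congr; intro a _; simp
  rw [h1, h2]
  omega

theorem pvMain (community : List Int) (adj : List (Int × List Int)) (source : Int) :
    ∀ (fb fa : Nat) (v : PySem.Dict Int Int) (s : PySem.Set Int) (front : List Int)
      (d acc : Int),
      v.keys = s → v.keys.Nodup → v.contains source = true →
      (∀ x ∈ front, v.contains x = true) → (∀ x ∈ front, v.getD x 0 = d) →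
      front.length + 2 * pvFree community source v + 1 ≤ fa →
      pvFree community source v + 2 ≤ fb →
      pvBfsB (PySem.Set.ofList community) adj fb s front d acc =
        acc + pvCondSum source (pvBfsA community adj fa v front) - pvCondSum source v := by
  intro fb
  induction fb with
  | zero => intro fa v s front d acc _ _ _ _ _ _ hfb; omega
  | succ fb ih =>
    intro fa v s front d acc hk hnd hsrc hfm hfv hfa hfb
    by_cases hfe : front = []
    · subst hfe
      have hLHS : pvBfsB (PySem.Set.ofList community) adj (fb + 1) s [] d acc = acc := rfl
      cases fa with
      | zero => simp [pvFree] at hfa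
      | succ fa' =>
        have hRHS : pvBfsA community adj (fa' + 1) v [] = v := rfl
        rw [hLHS, hRHS]
        ring
    · have hne : front.isEmpty = false := by simp [hfe]
      have hstep : pvBfsB (PySem.Set.ofList community) adj (fb + 1) s front d acc =
          pvBfsB (PySem.Set.ofList community) adj fb
            (pvBLevel (PySem.Set.ofList community) adj s front).1
            (pvBLevel (PySem.Set.ofList community) adj s front).2 (d + 1)
            (acc + (d + 1) *
              ((pvBLevel (PySem.Set.ofList community) adj s front).2.length : Int)) := by
        show (if front.isEmpty then acc else _) = _
        rw [hne]
        simp only [Bool.false_eq_true, if_false]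
        rfl
      obtain ⟨p1, p2, p3, p4, p5, p6, p7, p8, p9⟩ :=
        pvLevel community adj source d front v s hk hnd hsrc hfm hfv
      set RA := pvALevel community adj v front with hRA
      set RB := pvBLevel (PySem.Set.ofList community) adj s front with hRB
      have hsplit := pvBfsA_split community adj front [] v fa (by omega)
      rw [List.append_nil] at hsplit
      rw [List.nil_append] at hsplit
      have hfree := pvFree_drop community source v RA.1 RA.2 p3 p4 p5
      rw [hstep, hsplit, p2]
      by_cases hnew : RA.2 = []
      · rw [hnew]
        have hfb1 : 1 ≤ fb := by omega
        cases fb with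
        | zero => omega
        | succ g =>
          have hL : pvBfsB (PySem.Set.ofList community) adj (g + 1) RB.1 [] (d + 1)
              (acc + (d + 1) * (([] : List Int).length : Int)) =
              acc + (d + 1) * (([] : List Int).length : Int) := rfl
          rw [hL]
          have hfa1 : 1 ≤ fa - front.length := by omega
          cases hfa2 : fa - front.length with
          | zero => omega
          | succ fa' =>
            have hR : pvBfsA community adj (fa' + 1) RA.1 [] = RA.1 := rfl
            rw [hnew] at p8
            rw [hR, p8]
            simp
      · have hlen : 1 ≤ RA.2.length := List.length_pos_iff.mpr hnew
        have hfm' : ∀ x ∈ RA.2, RA.1.contains x = true := by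
          intro x hx
          rw [PySem.Dict.contains_iff_mem_keys, p3]
          exact List.mem_append_right _ hx
        have hihs := ih (fa - front.length) RA.1 RB.1 RA.2 (d + 1)
          (acc + (d + 1) * (RA.2.length : Int)) p1.symm p4 p9 hfm' p7
          (by omega) (by omega)
        rw [hihs, p8]
        ring

theorem pvItemsFold (source : Int) (l : List (Int × Int)) :
    ∀ init : Int, l.foldl (fun s nd => if nd.1 ≠ source then s + nd.2 else s) init
      = init + ((l.filter (fun nd => nd.1 != source)).map Prod.snd).sum := by
  induction l with
  | nil => intro init; simp
  | cons nd t iht =>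
    intro init
    simp only [List.foldl_cons]
    by_cases h : nd.1 = source
    · rw [if_neg (not_not_intro h), iht init]
      have hb : (nd.1 != source) = false := by simp [h]
      simp [hb]
    · rw [if_pos h, iht (init + nd.2)]
      have hb : (nd.1 != source) = true := by simp [h]
      simp only [List.filter_cons, hb, if_true, List.map_cons, List.sum_cons]
      ring

theorem pvCondSum_init (source : Int) :
    pvCondSum source ((PySem.Dict.empty : PySem.Dict Int Int).insert source 0) = 0 := by
  unfold pvCondSum
  rw [PySem.Dict.items_insert_of_not_contains _ 0 (PySem.Dict.contains_empty source)]
  simp [PySem.Dict.empty]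

theorem pvFree_init (community : List Int) (source : Int) :
    pvFree community source ((PySem.Dict.empty : PySem.Dict Int Int).insert source 0)
      ≤ community.length := by
  unfold pvFree
  have hpred : ∀ x ∈ (source :: community).dedup,
      (!(((PySem.Dict.empty : PySem.Dict Int Int).insert source 0).contains x))
        = !(x == source) := by
    intro x _
    rw [PySem.Dict.contains_insert]
    simp [PySem.Dict.contains_empty]
  rw [List.filter_congr hpred]
  have hsmem : source ∈ (source :: community).dedup :=
    List.mem_dedup.mpr (List.mem_cons_self)
  have hlen : (source :: community).dedup.length ≤ community.length + 1 := by
    have := (List.dedup_sublist (source :: community)).length_le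
    simpa using this
  have hlt : (List.filter (fun x => !(x == source)) ((source :: community).dedup)).length
      < (source :: community).dedup.length := by
    have hcnt := List.length_filter_lt_length_iff_exists
      (p := fun x => !(x == source)) (l := (source :: community).dedup)
    exact hcnt.mpr ⟨source, hsmem, by simp⟩
  omega

theorem pvPerSource (community : List Int) (adj : List (Int × List Int))
    (dist source : Int) :
    (pvBfsA community adj (2 * community.length + 2)
        ((PySem.Dict.empty).insert source 0) [source]).items.foldl
      (fun s nd => if nd.1 ≠ source then s + nd.2 else s) dist
    = pvBfsB (PySem.Set.ofList community) adj (community.length + 2)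
        (PySem.Set.ofList [source]) [source] 0 dist := by
  have h0c : ((PySem.Dict.empty : PySem.Dict Int Int).contains source) = false :=
    PySem.Dict.contains_empty source
  have h0k : ((PySem.Dict.empty : PySem.Dict Int Int).insert source 0).keys
      = (PySem.Set.ofList [source] : List Int) := by
    rw [PySem.Dict.keys_insert_of_not_contains _ 0 h0c]
    simp [PySem.Set.ofList, PySem.Set.add]
  have hnd0 : ((PySem.Dict.empty : PySem.Dict Int Int).insert source 0).keys.Nodup := by
    rw [PySem.Dict.keys_insert_of_not_contains _ 0 h0c]; simp
  have hsrc0 := PySem.Dict.contains_insert_self (PySem.Dict.empty : PySem.Dict Int Int)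
    source 0
  have hfree0 := pvFree_init community source
  have hmain := pvMain community adj source (community.length + 2)
    (2 * community.length + 2) ((PySem.Dict.empty).insert source 0)
    (PySem.Set.ofList [source]) [source] 0 dist h0k hnd0 hsrc0
    (by intro x hx; rw [List.mem_singleton.mp hx]; exact hsrc0)
    (by intro x hx; rw [List.mem_singleton.mp hx]
        exact PySem.Dict.getD_insert_self _ source 0 0)
    (by have := hfree0; simp only [List.length_singleton]; omega) (by omega)
  rw [hmain, pvItemsFold source _ dist, pvCondSum_init source]
  unfold pvCondSum
  ring


-- ===== the level iteration (spec) and the Bellman-Ford side =====================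

-- iterated BFS levels from one source: (seen, frontier) after k levels
def pvSt (community : List Int) (adj : List (Int × List Int)) (source : Int) :
    Nat → PySem.Set Int × List Int
  | 0 => (PySem.Set.ofList [source], [source])
  | k + 1 => pvBLevel (PySem.Set.ofList community) adj
      (pvSt community adj source k).1 (pvSt community adj source k).2

-- sum of j * |level j| for j = k+1 .. k+fuel
def pvLS (community : List Int) (adj : List (Int × List Int)) (source : Int) :
    Nat → Nat → Int
  | _, 0 => 0
  | k, fuel + 1 => ((k + 1 : Nat) : Int) * ((pvSt community adj source (k + 1)).2.length : Int)
      + pvLS community adj source (k + 1) fuel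

-- the rounds iteration without the early break
def pvIter (community : List Int) (comm : PySem.Set Int) (adj : List (Int × List Int)) :
    Nat → PySem.Dict Int Int → PySem.Dict Int Int
  | 0, dist => dist
  | k + 1, dist => pvIter community comm adj k (pvRound community comm adj dist).1

-- generic fold helpers ------------------------------------------------------

theorem pvFoldlInv {sigma alpha : Type} (Inv : sigma → Prop) (f : sigma → alpha → sigma)
    (h : ∀ s x, Inv s → Inv (f s x)) :
    ∀ (l : List alpha) (s : sigma), Inv s → Inv (l.foldl f s) := by
  intro l
  induction l with
  | nil => intro s hs; simpa using hs
  | cons x t ih => intro s hs; exact ih _ (h s x hs)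

theorem pvFoldlRel {sigma alpha : Type} (R : sigma → sigma → Prop) (f : sigma → alpha → sigma)
    (htrans : ∀ a b c, R a b → R b c → R a c)
    (hrefl : ∀ s, R s s) (h : ∀ s x, R s (f s x)) :
    ∀ (l : List alpha) (s : sigma), R s (l.foldl f s) := by
  intro l
  induction l with
  | nil => intro s; simpa using hrefl s
  | cons x t ih => intro s; exact htrans _ _ _ (h s x) (ih (f s x))

theorem pvFoldFlag {alpha : Type} (f : PySem.Dict Int Int × Bool → alpha → PySem.Dict Int Int × Bool)
    (h1 : ∀ st x, f st x = st ∨ (f st x).2 = true)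
    (h2 : ∀ st x, st.2 = true → (f st x).2 = true) :
    ∀ (l : List alpha) st, l.foldl f st = st ∨ (l.foldl f st).2 = true := by
  intro l
  induction l with
  | nil => intro st; exact Or.inl rfl
  | cons x t ih =>
    intro st
    rcases h1 st x with h | h
    · rw [List.foldl_cons, h]; exact ih st
    · right
      have := pvFoldlInv (fun s => s.2 = true) f h2 t (f st x) h
      simpa using this

-- level-BFS step facts ------------------------------------------------------

theorem pvStepB_not_mem (comm : PySem.Set Int) (st : PySem.Set Int × List Int) (v : Int)
    (hc : (PySem.Set.contains comm v && !(PySem.Set.contains st.1 v)) = true) : v ∉ st.1 := by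
  have h2 := hc
  simp only [Bool.and_eq_true] at h2
  simpa [pysem] using h2.2

theorem pvStepB_true (comm : PySem.Set Int) (st : PySem.Set Int × List Int) (v : Int)
    (hc : (PySem.Set.contains comm v && !(PySem.Set.contains st.1 v)) = true) :
    pvStepB comm st v = (st.1 ++ [v], st.2 ++ [v]) := by
  have hnv := pvStepB_not_mem comm st v hc
  unfold pvStepB
  simp only [hc]
  simp [PySem.Set.add_of_not_mem hnv]

theorem pvStepB_false (comm : PySem.Set Int) (st : PySem.Set Int × List Int) (v : Int)
    (hc : (PySem.Set.contains comm v && !(PySem.Set.contains st.1 v)) = false) :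
    pvStepB comm st v = st := by
  unfold pvStepB
  simp only [hc]
  simp

theorem pvStepB_mem (comm : PySem.Set Int) (st : PySem.Set Int × List Int) (v x : Int)
    (hx : x ∈ st.1) : x ∈ (pvStepB comm st v).1 := by
  cases hc : (PySem.Set.contains comm v && !(PySem.Set.contains st.1 v)) with
  | false => rw [pvStepB_false comm st v hc]; exact hx
  | true => rw [pvStepB_true comm st v hc]; exact List.mem_append_left _ hx

theorem pvInnerFold_mem (comm : PySem.Set Int) (ns : List Int)
    (st : PySem.Set Int × List Int) (x : Int) (hx : x ∈ st.1) :
    x ∈ (ns.foldl (pvStepB comm) st).1 :=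
  pvFoldlRel (fun a b : PySem.Set Int × List Int => ∀ y, y ∈ a.1 → y ∈ b.1)
    (pvStepB comm) (fun _ _ _ h1 h2 y hy => h2 y (h1 y hy)) (fun _ y hy => hy)
    (fun s v y hy => pvStepB_mem comm s v y hy) ns st x hx

theorem pvOuter_mem (comm : PySem.Set Int) (adj : List (Int × List Int))
    (front : List Int) (st : PySem.Set Int × List Int) (x : Int) (hx : x ∈ st.1) :
    x ∈ (front.foldl (fun st u => (pvNbrs adj u).foldl (pvStepB comm) st) st).1 :=
  pvFoldlRel (fun a b : PySem.Set Int × List Int => ∀ y, y ∈ a.1 → y ∈ b.1)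
    (fun st u => (pvNbrs adj u).foldl (pvStepB comm) st)
    (fun _ _ _ h1 h2 y hy => h2 y (h1 y hy)) (fun _ y hy => hy)
    (fun s u y hy => pvInnerFold_mem comm (pvNbrs adj u) s y hy) front st x hx

theorem pvBLevel_fst (comm : PySem.Set Int) (adj : List (Int × List Int))
    (s : PySem.Set Int) (front : List Int) :
    (pvBLevel comm adj s front).1 = s ++ (pvBLevel comm adj s front).2 := by
  unfold pvBLevel
  refine pvFoldlInv (fun st : PySem.Set Int × List Int => st.1 = s ++ st.2)
    (fun st u => (pvNbrs adj u).foldl (pvStepB comm) st) ?_ front (s, ([] : List Int)) (by simp)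
  intro st u h
  refine pvFoldlInv (fun st : PySem.Set Int × List Int => st.1 = s ++ st.2)
    (pvStepB comm) ?_ (pvNbrs adj u) st h
  intro st' v h'
  cases hc : (PySem.Set.contains comm v && !(PySem.Set.contains st'.1 v)) with
  | false => rw [pvStepB_false comm st' v hc]; exact h'
  | true => rw [pvStepB_true comm st' v hc]; simp [h']

theorem pvBLevel_nodup (comm : PySem.Set Int) (adj : List (Int × List Int))
    (s : PySem.Set Int) (front : List Int) (hs : s.Nodup) :
    (pvBLevel comm adj s front).1.Nodup := by
  unfold pvBLevel
  refine pvFoldlInv (fun st : PySem.Set Int × List Int => st.1.Nodup)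
    (fun st u => (pvNbrs adj u).foldl (pvStepB comm) st) ?_ front (s, ([] : List Int)) hs
  intro st u h
  refine pvFoldlInv (fun st : PySem.Set Int × List Int => st.1.Nodup)
    (pvStepB comm) ?_ (pvNbrs adj u) st h
  intro st' v h'
  cases hc : (PySem.Set.contains comm v && !(PySem.Set.contains st'.1 v)) with
  | false => rw [pvStepB_false comm st' v hc]; exact h'
  | true =>
    have hnv := pvStepB_not_mem comm st' v hc
    rw [pvStepB_true comm st' v hc]
    show (st'.1 ++ [v]).Nodup
    rw [← PySem.Set.add_of_not_mem hnv]
    exact PySem.Set.nodup_add st'.1 v h'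

theorem pvBLevel_members (community : List Int) (adj : List (Int × List Int))
    (source : Int) (s : PySem.Set Int) (front : List Int)
    (hs : ∀ x ∈ s, x = source ∨ x ∈ community) :
    ∀ x ∈ (pvBLevel (PySem.Set.ofList community) adj s front).1, x = source ∨ x ∈ community := by
  unfold pvBLevel
  refine pvFoldlInv (fun st : PySem.Set Int × List Int => ∀ x ∈ st.1, x = source ∨ x ∈ community)
    (fun st u => (pvNbrs adj u).foldl (pvStepB (PySem.Set.ofList community)) st) ?_
    front (s, ([] : List Int)) hs
  intro st u h
  refine pvFoldlInv (fun st : PySem.Set Int × List Int => ∀ x ∈ st.1, x = source ∨ x ∈ community)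
    (pvStepB (PySem.Set.ofList community)) ?_ (pvNbrs adj u) st h
  intro st' v h' x hx
  cases hc : (PySem.Set.contains (PySem.Set.ofList community) v && !(PySem.Set.contains st'.1 v)) with
  | false => rw [pvStepB_false _ _ _ hc] at hx; exact h' x hx
  | true =>
    rw [pvStepB_true _ _ _ hc] at hx
    rcases List.mem_append.mp hx with hx1 | hx2
    · exact h' x hx1
    · right
      have h2 := hc
      simp only [Bool.and_eq_true] at h2
      have hvc : v ∈ community := by simpa [pysem] using h2.1
      rw [List.mem_singleton.mp hx2]
      exact hvc

theorem pvInner_adds (comm : PySem.Set Int) (v : Int)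
    (hc : PySem.Set.contains comm v = true) :
    ∀ (ns : List Int) (st : PySem.Set Int × List Int), v ∈ ns →
      v ∈ (ns.foldl (pvStepB comm) st).1 := by
  intro ns
  induction ns with
  | nil => intro st hv; cases hv
  | cons w t ih =>
    intro st hv
    rw [List.foldl_cons]
    rcases List.mem_cons.mp hv with hw | ht
    · subst hw
      have hmem : v ∈ (pvStepB comm st v).1 := by
        cases hcond : (PySem.Set.contains comm v && !(PySem.Set.contains st.1 v)) with
        | true =>
          rw [pvStepB_true comm st v hcond]
          exact List.mem_append_right _ (List.mem_singleton_self v)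
        | false =>
          rw [pvStepB_false comm st v hcond]
          cases hcc : PySem.Set.contains st.1 v with
          | true => simpa [pysem] using hcc
          | false => exfalso; rw [hc, hcc] at hcond; simp at hcond
      exact pvInnerFold_mem comm t _ v hmem
    · exact ih (pvStepB comm st w) ht

theorem pvLevelClosure (comm : PySem.Set Int) (adj : List (Int × List Int)) (u v : Int)
    (hv : v ∈ pvNbrs adj u) (hc : PySem.Set.contains comm v = true) :
    ∀ (front : List Int) (st : PySem.Set Int × List Int), u ∈ front →
      v ∈ (front.foldl (fun st u => (pvNbrs adj u).foldl (pvStepB comm) st) st).1 := by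
  intro front
  induction front with
  | nil => intro st hu; cases hu
  | cons w t ih =>
    intro st hu
    rw [List.foldl_cons]
    rcases List.mem_cons.mp hu with hw | ht
    · subst hw
      exact pvOuter_mem comm adj t _ v (pvInner_adds comm v hc (pvNbrs adj u) st hv)
    · exact ih _ ht

theorem pvInner_pred (comm : PySem.Set Int) (x : Int) :
    ∀ (ns : List Int) (st : PySem.Set Int × List Int),
      x ∈ (ns.foldl (pvStepB comm) st).2 →
      x ∈ st.2 ∨ (x ∈ ns ∧ PySem.Set.contains comm x = true) := by
  intro ns
  induction ns with
  | nil => intro st hx; exact Or.inl hx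
  | cons w t ih =>
    intro st hx
    rw [List.foldl_cons] at hx
    rcases ih (pvStepB comm st w) hx with h | h
    · cases hcond : (PySem.Set.contains comm w && !(PySem.Set.contains st.1 w)) with
      | false => rw [pvStepB_false comm st w hcond] at h; exact Or.inl h
      | true =>
        rw [pvStepB_true comm st w hcond] at h
        rcases List.mem_append.mp h with h1 | h1
        · exact Or.inl h1
        · right
          have h2 := hcond
          simp only [Bool.and_eq_true] at h2
          have hxw := List.mem_singleton.mp h1
          subst hxw
          exact ⟨List.mem_cons_self, h2.1⟩
    · exact Or.inr ⟨List.mem_cons_of_mem w h.1, h.2⟩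

theorem pvBLevel_pred (comm : PySem.Set Int) (adj : List (Int × List Int))
    (s : PySem.Set Int) (front : List Int) (x : Int)
    (hx : x ∈ (pvBLevel comm adj s front).2) :
    ∃ u ∈ front, x ∈ pvNbrs adj u ∧ PySem.Set.contains comm x = true := by
  have hgen : ∀ (front : List Int) (st : PySem.Set Int × List Int),
      x ∈ (front.foldl (fun st u => (pvNbrs adj u).foldl (pvStepB comm) st) st).2 →
      x ∈ st.2 ∨ ∃ u ∈ front, x ∈ pvNbrs adj u ∧ PySem.Set.contains comm x = true := by
    intro front
    induction front with
    | nil => intro st hx; exact Or.inl hx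
    | cons w t ih =>
      intro st hx
      rw [List.foldl_cons] at hx
      rcases ih _ hx with h | h
      · rcases pvInner_pred comm x (pvNbrs adj w) st h with h1 | h1
        · exact Or.inl h1
        · exact Or.inr ⟨w, List.mem_cons_self, h1.1, h1.2⟩
      · obtain ⟨u, hu, h2, h3⟩ := h
        exact Or.inr ⟨u, List.mem_cons_of_mem w hu, h2, h3⟩
  rcases hgen front (s, ([] : List Int)) hx with h | h
  · cases h
  · exact h

-- pvSt facts ---------------------------------------------------------------

theorem pvSt_fst (community : List Int) (adj : List (Int × List Int)) (source : Int) (k : Nat) :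
    (pvSt community adj source (k + 1)).1 =
      (pvSt community adj source k).1 ++ (pvSt community adj source (k + 1)).2 := by
  simp only [pvSt]
  exact pvBLevel_fst (PySem.Set.ofList community) adj
    (pvSt community adj source k).1 (pvSt community adj source k).2

theorem pvSt_sub (community : List Int) (adj : List (Int × List Int)) (source : Int) (k : Nat)
    (x : Int) (hx : x ∈ (pvSt community adj source k).2) : x ∈ (pvSt community adj source k).1 := by
  cases k with
  | zero => simpa [pvSt, pysem] using hx
  | succ k => rw [pvSt_fst]; exact List.mem_append_right _ hx

theorem pvSt_nodup (community : List Int) (adj : List (Int × List Int)) (source : Int) (k : Nat) :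
    (pvSt community adj source k).1.Nodup := by
  induction k with
  | zero => exact PySem.Set.nodup_ofList [source]
  | succ k ih =>
    simp only [pvSt]
    exact pvBLevel_nodup (PySem.Set.ofList community) adj _ _ ih

theorem pvSt_members (community : List Int) (adj : List (Int × List Int)) (source : Int)
    (k : Nat) (x : Int) (hx : x ∈ (pvSt community adj source k).1) :
    x = source ∨ x ∈ community := by
  induction k generalizing x with
  | zero => left; simpa [pvSt, pysem] using hx
  | succ k ih =>
    simp only [pvSt] at hx
    exact pvBLevel_members community adj source _ _ ih x hx

theorem pvSt_mem_mono (community : List Int) (adj : List (Int × List Int)) (source : Int)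
    {k k' : Nat} (hk : k ≤ k') (x : Int) (hx : x ∈ (pvSt community adj source k).1) :
    x ∈ (pvSt community adj source k').1 := by
  induction k', hk using Nat.le_induction with
  | base => exact hx
  | succ k' hk' ih => rw [pvSt_fst]; exact List.mem_append_left _ ih

theorem pvSt_level (community : List Int) (adj : List (Int × List Int)) (source : Int)
    (k : Nat) (x : Int) (hx : x ∈ (pvSt community adj source k).1) :
    ∃ j, j ≤ k ∧ x ∈ (pvSt community adj source j).2 := by
  induction k with
  | zero => exact ⟨0, le_refl 0, by simpa [pvSt, pysem] using hx⟩
  | succ k ih =>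
    rw [pvSt_fst] at hx
    rcases List.mem_append.mp hx with h | h
    · obtain ⟨j, hj, hjx⟩ := ih h
      exact ⟨j, Nat.le_succ_of_le hj, hjx⟩
    · exact ⟨k + 1, le_refl _, h⟩

theorem pvSt_fresh (community : List Int) (adj : List (Int × List Int)) (source : Int)
    (k : Nat) (x : Int) (hx : x ∈ (pvSt community adj source (k + 1)).2) :
    x ∉ (pvSt community adj source k).1 := by
  have hnd := pvSt_nodup community adj source (k + 1)
  rw [pvSt_fst] at hnd
  intro hmem
  rcases List.nodup_append.mp hnd with ⟨_, _, hdisj⟩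
  exact hdisj x hmem x hx rfl

theorem pvSt_closure (community : List Int) (adj : List (Int × List Int)) (source : Int)
    (k : Nat) (u v : Int) (hu : u ∈ (pvSt community adj source k).1)
    (hv : v ∈ pvNbrs adj u) (hc : PySem.Set.contains (PySem.Set.ofList community) v = true) :
    v ∈ (pvSt community adj source (k + 1)).1 := by
  obtain ⟨j, hj, hju⟩ := pvSt_level community adj source k u hu
  have hmem : v ∈ (pvSt community adj source (j + 1)).1 := by
    simp only [pvSt]
    exact pvLevelClosure (PySem.Set.ofList community) adj u v hv hc
      (pvSt community adj source j).2 _ hju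
  exact pvSt_mem_mono community adj source (Nat.succ_le_succ hj) v hmem

theorem pvSt_empty_succ (community : List Int) (adj : List (Int × List Int)) (source : Int)
    (m : Nat) (hm : (pvSt community adj source m).2 = []) :
    pvSt community adj source (m + 1) = pvSt community adj source m := by
  have h2 : pvSt community adj source (m + 1) = ((pvSt community adj source m).1, []) := by
    simp only [pvSt, hm]
    rfl
  rw [h2, ← hm]

theorem pvSt_empty_ge (community : List Int) (adj : List (Int × List Int)) (source : Int)
    {k j : Nat} (hk : k ≤ j) (he : (pvSt community adj source k).2 = []) :
    pvSt community adj source j = pvSt community adj source k := by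
  induction j, hk using Nat.le_induction with
  | base => rfl
  | succ j' hj' ih => rw [pvSt_empty_succ community adj source j' (by rw [ih]; exact he), ih]

theorem pvSt_last (community : List Int) (adj : List (Int × List Int)) (source : Int)
    (hs : source ∈ community) : (pvSt community adj source community.length).2 = [] := by
  by_contra hne
  have hall : ∀ j, j ≤ community.length → (pvSt community adj source j).2 ≠ [] := by
    intro j hj hempty
    exact hne (by rw [pvSt_empty_ge community adj source hj hempty]; exact hempty)
  have hlen : ∀ k, k ≤ community.length → k + 1 ≤ (pvSt community adj source k).1.length := by
    intro k
    induction k with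
    | zero => intro _; exact le_of_eq rfl
    | succ k ih =>
      intro hk
      have h1 := ih (Nat.le_of_succ_le hk)
      have h2 : (pvSt community adj source (k + 1)).2 ≠ [] := hall (k + 1) hk
      have h4 : 1 ≤ (pvSt community adj source (k + 1)).2.length :=
        List.length_pos_iff.mpr h2
      have h5 : (pvSt community adj source (k + 1)).1.length
          = (pvSt community adj source k).1.length
            + (pvSt community adj source (k + 1)).2.length := by
        rw [pvSt_fst]; simp
      omega
  have h6 := hlen community.length (le_refl _)
  have hsub : (pvSt community adj source community.length).1 ⊆ community := by
    intro x hx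
    rcases pvSt_members community adj source _ x hx with h | h
    · rw [h]; exact hs
    · exact h
  have h7 := (List.subperm_of_subset
    (pvSt_nodup community adj source community.length) hsub).length_le
  omega

-- pvLS facts ---------------------------------------------------------------

theorem pvLS_zero_of_empty (community : List Int) (adj : List (Int × List Int)) (source : Int) :
    ∀ (fuel k : Nat), (pvSt community adj source k).2 = [] →
      pvLS community adj source k fuel = 0 := by
  intro fuel
  induction fuel with
  | zero => intro k _; rfl
  | succ fuel ih =>
    intro k he
    have hsucc := pvSt_empty_succ community adj source k he
    simp only [pvLS]
    rw [hsucc, he, ih (k + 1) (by rw [hsucc]; exact he)]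
    simp

theorem pvLS_split (community : List Int) (adj : List (Int × List Int)) (source : Int) :
    ∀ (a k b : Nat), pvLS community adj source k (a + b)
      = pvLS community adj source k a + pvLS community adj source (k + a) b := by
  intro a
  induction a with
  | zero => intro k b; simp [pvLS]
  | succ a ih =>
    intro k b
    have h1 : a + 1 + b = (a + b) + 1 := by omega
    rw [h1]
    simp only [pvLS]
    rw [ih (k + 1) b]
    have h2 : k + 1 + a = k + (a + 1) := by omega
    rw [h2]
    ring

theorem pvBfsB_LS (community : List Int) (adj : List (Int × List Int)) (source : Int) :
    ∀ (fuel k : Nat) (acc : Int),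
      pvBfsB (PySem.Set.ofList community) adj fuel (pvSt community adj source k).1
        (pvSt community adj source k).2 (k : Int) acc
      = acc + pvLS community adj source k fuel := by
  intro fuel
  induction fuel with
  | zero => intro k acc; simp [pvBfsB, pvLS]
  | succ fuel ih =>
    intro k acc
    by_cases hfe : (pvSt community adj source k).2 = []
    · have hL : pvBfsB (PySem.Set.ofList community) adj (fuel + 1)
          (pvSt community adj source k).1 (pvSt community adj source k).2 (k : Int) acc = acc := by
        show (if (pvSt community adj source k).2.isEmpty then acc else _) = acc
        rw [hfe]
        rfl
      rw [hL, pvLS_zero_of_empty community adj source (fuel + 1) k hfe]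
      simp
    · have hne : (pvSt community adj source k).2.isEmpty = false := by simp [hfe]
      have hSt : pvSt community adj source (k + 1)
          = pvBLevel (PySem.Set.ofList community) adj
            (pvSt community adj source k).1 (pvSt community adj source k).2 := by
        simp only [pvSt]
      have hstep : pvBfsB (PySem.Set.ofList community) adj (fuel + 1)
          (pvSt community adj source k).1 (pvSt community adj source k).2 (k : Int) acc =
          pvBfsB (PySem.Set.ofList community) adj fuel
            (pvSt community adj source (k + 1)).1 (pvSt community adj source (k + 1)).2
            ((k : Int) + 1)
            (acc + ((k : Int) + 1) * ((pvSt community adj source (k + 1)).2.length : Int)) := by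
        show (if (pvSt community adj source k).2.isEmpty then acc else _) = _
        rw [hne]
        simp only [Bool.false_eq_true, if_false]
        rw [hSt]
        rfl
      have hcast : (k : Int) + 1 = ((k + 1 : Nat) : Int) := by push_cast; ring
      rw [hstep, hcast, ih (k + 1) _]
      simp only [pvLS]
      push_cast
      ring

-- Bellman-Ford step characterisations ---------------------------------------

theorem pvRelaxV_true (comm : PySem.Set Int) (du : Int) (st : PySem.Dict Int Int × Bool) (v : Int)
    (hc : (PySem.Set.contains comm v && (!(st.1.contains v) || decide (du + 1 < st.1.getD v 0))) = true) :
    pvRelaxV comm du st v = (st.1.insert v (du + 1), true) := by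
  unfold pvRelaxV
  simp only [hc]
  simp

theorem pvRelaxV_false (comm : PySem.Set Int) (du : Int) (st : PySem.Dict Int Int × Bool) (v : Int)
    (hc : (PySem.Set.contains comm v && (!(st.1.contains v) || decide (du + 1 < st.1.getD v 0))) = false) :
    pvRelaxV comm du st v = st := by
  unfold pvRelaxV
  simp only [hc]
  simp

-- Bellman-Ford invariants ---------------------------------------------------

-- dict ordering: a relaxation step only adds keys and lowers values
def pvDLe (d d' : PySem.Dict Int Int) : Prop :=
  ∀ w, d.contains w = true → d'.contains w = true ∧ d'.getD w 0 ≤ d.getD w 0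

theorem pvDLe_refl (d : PySem.Dict Int Int) : pvDLe d d :=
  fun w hw => ⟨hw, le_refl _⟩

theorem pvDLe_trans {a b c : PySem.Dict Int Int} (h1 : pvDLe a b) (h2 : pvDLe b c) :
    pvDLe a c := by
  intro w hw
  obtain ⟨hb, hvb⟩ := h1 w hw
  obtain ⟨hc, hvc⟩ := h2 w hb
  exact ⟨hc, le_trans hvc hvb⟩

theorem pvRelaxV_mono (comm : PySem.Set Int) (du : Int) (st : PySem.Dict Int Int × Bool)
    (v : Int) : pvDLe st.1 (pvRelaxV comm du st v).1 := by
  cases hc : (PySem.Set.contains comm v && (!(st.1.contains v) || decide (du + 1 < st.1.getD v 0))) with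
  | false => rw [pvRelaxV_false comm du st v hc]; exact pvDLe_refl _
  | true =>
    rw [pvRelaxV_true comm du st v hc]
    intro w hw
    by_cases hwv : w = v
    · subst hwv
      refine ⟨PySem.Dict.contains_insert_self st.1 w (du + 1), ?_⟩
      rw [PySem.Dict.getD_insert_self st.1 w (du + 1) 0]
      have h2 := hc
      simp only [Bool.and_eq_true, Bool.or_eq_true] at h2
      rcases h2.2 with h3 | h3
      · rw [Bool.not_eq_true'] at h3; rw [hw] at h3; cases h3
      · have := of_decide_eq_true h3; omega
    · rw [PySem.Dict.contains_insert]
      refine ⟨by simp [hw], ?_⟩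
      rw [PySem.Dict.getD_insert_of_ne st.1 (du + 1) 0 hwv]

theorem pvRelaxU_mono (comm : PySem.Set Int) (adj : List (Int × List Int))
    (st : PySem.Dict Int Int × Bool) (u : Int) : pvDLe st.1 (pvRelaxU comm adj st u).1 := by
  unfold pvRelaxU
  by_cases hcu : st.1.contains u = true
  · rw [if_pos hcu]
    exact pvFoldlRel (fun a b : PySem.Dict Int Int × Bool => pvDLe a.1 b.1)
      (pvRelaxV comm (st.1.getD u 0)) (fun _ _ _ hab hbc => pvDLe_trans hab hbc)
      (fun s => pvDLe_refl s.1) (fun s x => pvRelaxV_mono comm _ s x) (pvNbrs adj u) st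
  · rw [if_neg hcu]; exact pvDLe_refl _

theorem pvRoundFold_mono (comm : PySem.Set Int) (adj : List (Int × List Int))
    (l : List Int) (st : PySem.Dict Int Int × Bool) :
    pvDLe st.1 (l.foldl (pvRelaxU comm adj) st).1 :=
  pvFoldlRel (fun a b : PySem.Dict Int Int × Bool => pvDLe a.1 b.1)
    (pvRelaxU comm adj) (fun _ _ _ hab hbc => pvDLe_trans hab hbc)
    (fun s => pvDLe_refl s.1) (fun s x => pvRelaxU_mono comm adj s x) l st

theorem pvRound_nochange (community : List Int) (comm : PySem.Set Int)
    (adj : List (Int × List Int)) (dist : PySem.Dict Int Int)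
    (h : (pvRound community comm adj dist).2 = false) :
    (pvRound community comm adj dist).1 = dist := by
  have hV1 : ∀ (du : Int) (st : PySem.Dict Int Int × Bool) (x : Int),
      pvRelaxV comm du st x = st ∨ (pvRelaxV comm du st x).2 = true := by
    intro du st x
    cases hc : (PySem.Set.contains comm x && (!(st.1.contains x) || decide (du + 1 < st.1.getD x 0))) with
    | false => exact Or.inl (pvRelaxV_false comm du st x hc)
    | true => right; rw [pvRelaxV_true comm du st x hc]
  have hV2 : ∀ (du : Int) (st : PySem.Dict Int Int × Bool) (x : Int),
      st.2 = true → (pvRelaxV comm du st x).2 = true := by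
    intro du st x h2
    cases hc : (PySem.Set.contains comm x && (!(st.1.contains x) || decide (du + 1 < st.1.getD x 0))) with
    | false => rw [pvRelaxV_false comm du st x hc]; exact h2
    | true => rw [pvRelaxV_true comm du st x hc]
  have hU1 : ∀ (st : PySem.Dict Int Int × Bool) (u : Int),
      pvRelaxU comm adj st u = st ∨ (pvRelaxU comm adj st u).2 = true := by
    intro st u
    unfold pvRelaxU
    by_cases hcu : st.1.contains u = true
    · rw [if_pos hcu]
      exact pvFoldFlag (pvRelaxV comm (st.1.getD u 0)) (hV1 _) (hV2 _) (pvNbrs adj u) st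
    · rw [if_neg hcu]; exact Or.inl rfl
  have hU2 : ∀ (st : PySem.Dict Int Int × Bool) (u : Int),
      st.2 = true → (pvRelaxU comm adj st u).2 = true := by
    intro st u h2
    unfold pvRelaxU
    by_cases hcu : st.1.contains u = true
    · rw [if_pos hcu]
      exact pvFoldlInv (fun s : PySem.Dict Int Int × Bool => s.2 = true) _ (hV2 _)
        (pvNbrs adj u) st h2
    · rw [if_neg hcu]; exact h2
  unfold pvRound at h ⊢
  rcases pvFoldFlag (pvRelaxU comm adj) hU1 hU2 community (dist, false) with heq | hflag
  · rw [heq]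
  · rw [h] at hflag; cases hflag

theorem pvIter_fix (community : List Int) (comm : PySem.Set Int) (adj : List (Int × List Int))
    (dist : PySem.Dict Int Int) (h : (pvRound community comm adj dist).1 = dist) :
    ∀ k, pvIter community comm adj k dist = dist := by
  intro k
  induction k with
  | zero => rfl
  | succ k ih => simp only [pvIter]; rw [h]; exact ih

theorem pvBF_eq_iter (community : List Int) (comm : PySem.Set Int) (adj : List (Int × List Int)) :
    ∀ (k : Nat) (dist : PySem.Dict Int Int),
      pvBF community comm adj k dist = pvIter community comm adj k dist := by
  intro k
  induction k with
  | zero => intro dist; rfl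
  | succ k ih =>
    intro dist
    simp only [pvBF, pvIter]
    by_cases hfl : (pvRound community comm adj dist).2 = true
    · rw [if_pos hfl, ih]
    · have hfl' : (pvRound community comm adj dist).2 = false := by
        cases hh : (pvRound community comm adj dist).2
        · rfl
        · exact absurd hh hfl
      have h1 := pvRound_nochange community comm adj dist hfl'
      rw [if_neg hfl, h1, pvIter_fix community comm adj dist h1 k]

-- every recorded distance is realised by the level iteration
def pvSound (community : List Int) (adj : List (Int × List Int)) (source : Int)
    (dist : PySem.Dict Int Int) : Prop :=
  ∀ v, dist.contains v = true →
    ∃ d : Nat, dist.getD v 0 = (d : Int) ∧ v ∈ (pvSt community adj source d).1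

theorem pvRelaxV_fold_sound (community : List Int) (adj : List (Int × List Int)) (source : Int)
    (dU : Nat) :
    ∀ (ns : List Int),
      (∀ w ∈ ns, PySem.Set.contains (PySem.Set.ofList community) w = true →
        w ∈ (pvSt community adj source (dU + 1)).1) →
      ∀ st : PySem.Dict Int Int × Bool, pvSound community adj source st.1 →
        pvSound community adj source
          ((ns.foldl (pvRelaxV (PySem.Set.ofList community) ((dU : Nat) : Int)) st).1) := by
  intro ns
  induction ns with
  | nil => intro _ st hs; simpa using hs
  | cons w t ih =>
    intro hns st hs
    rw [List.foldl_cons]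
    apply ih (fun x hx hcx => hns x (List.mem_cons_of_mem w hx) hcx)
    cases hc : (PySem.Set.contains (PySem.Set.ofList community) w &&
        (!(st.1.contains w) || decide (((dU : Nat) : Int) + 1 < st.1.getD w 0))) with
    | false => rw [pvRelaxV_false _ _ _ _ hc]; exact hs
    | true =>
      rw [pvRelaxV_true _ _ _ _ hc]
      intro x hx
      by_cases hxw : x = w
      · subst hxw
        refine ⟨dU + 1, ?_, ?_⟩
        · rw [PySem.Dict.getD_insert_self]
          push_cast
          ring
        · have h2 := hc
          simp only [Bool.and_eq_true] at h2
          exact hns x List.mem_cons_self h2.1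
      · rw [PySem.Dict.contains_insert] at hx
        have hx' : st.1.contains x = true := by simpa [hxw] using hx
        obtain ⟨d, hd1, hd2⟩ := hs x hx'
        exact ⟨d, by rw [PySem.Dict.getD_insert_of_ne st.1 _ 0 hxw]; exact hd1, hd2⟩

theorem pvRelaxU_sound (community : List Int) (adj : List (Int × List Int)) (source : Int)
    (st : PySem.Dict Int Int × Bool) (u : Int) (hs : pvSound community adj source st.1) :
    pvSound community adj source ((pvRelaxU (PySem.Set.ofList community) adj st u).1) := by
  unfold pvRelaxU
  by_cases hcu : st.1.contains u = true
  · rw [if_pos hcu]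
    obtain ⟨dU, hd1, hd2⟩ := hs u hcu
    have hns : ∀ w ∈ pvNbrs adj u,
        PySem.Set.contains (PySem.Set.ofList community) w = true →
        w ∈ (pvSt community adj source (dU + 1)).1 := by
      intro w hw hcw
      exact pvSt_closure community adj source dU u w hd2 hw hcw
    rw [hd1]
    exact pvRelaxV_fold_sound community adj source dU (pvNbrs adj u) hns st hs
  · rw [if_neg hcu]; exact hs

theorem pvIter_sound (community : List Int) (adj : List (Int × List Int)) (source : Int) :
    ∀ (k : Nat) (dist : PySem.Dict Int Int),
      pvSound community adj source dist →
      pvSound community adj source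
        (pvIter community (PySem.Set.ofList community) adj k dist) := by
  intro k
  induction k with
  | zero => intro dist hs; simpa [pvIter] using hs
  | succ k ih =>
    intro dist hs
    simp only [pvIter]
    apply ih
    unfold pvRound
    exact pvFoldlInv (fun st : PySem.Dict Int Int × Bool => pvSound community adj source st.1)
      (pvRelaxU (PySem.Set.ofList community) adj)
      (fun st u h => pvRelaxU_sound community adj source st u h) community (dist, false) hs

theorem pvIter_nodup (community : List Int) (comm : PySem.Set Int)
    (adj : List (Int × List Int)) :
    ∀ (k : Nat) (dist : PySem.Dict Int Int), dist.keys.Nodup →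
      (pvIter community comm adj k dist).keys.Nodup := by
  have hV : ∀ (du : Int) (st : PySem.Dict Int Int × Bool) (x : Int),
      st.1.keys.Nodup → (pvRelaxV comm du st x).1.keys.Nodup := by
    intro du st x h
    cases hc : (PySem.Set.contains comm x && (!(st.1.contains x) || decide (du + 1 < st.1.getD x 0))) with
    | false => rw [pvRelaxV_false comm du st x hc]; exact h
    | true => rw [pvRelaxV_true comm du st x hc]; exact PySem.Dict.nodup_keys_insert st.1 x (du + 1) h
  have hU : ∀ (st : PySem.Dict Int Int × Bool) (u : Int),
      st.1.keys.Nodup → (pvRelaxU comm adj st u).1.keys.Nodup := by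
    intro st u h
    unfold pvRelaxU
    by_cases hcu : st.1.contains u = true
    · rw [if_pos hcu]
      exact pvFoldlInv (fun s : PySem.Dict Int Int × Bool => s.1.keys.Nodup) _ (hV _)
        (pvNbrs adj u) st h
    · rw [if_neg hcu]; exact h
  intro k
  induction k with
  | zero => intro dist h; simpa [pvIter] using h
  | succ k ih =>
    intro dist h
    simp only [pvIter]
    apply ih
    unfold pvRound
    exact pvFoldlInv (fun st : PySem.Dict Int Int × Bool => st.1.keys.Nodup) _ hU
      community (dist, false) h

-- every node of level j <= k is recorded with a distance <= j
def pvComp (community : List Int) (adj : List (Int × List Int)) (source : Int)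
    (k : Nat) (dist : PySem.Dict Int Int) : Prop :=
  ∀ j : Nat, j ≤ k → ∀ v ∈ (pvSt community adj source j).2,
    dist.contains v = true ∧ dist.getD v 0 ≤ (j : Int)

theorem pvRelaxReach (comm : PySem.Set Int) (du : Int) (v : Int)
    (hcv : PySem.Set.contains comm v = true) :
    ∀ (ns : List Int) (st : PySem.Dict Int Int × Bool), v ∈ ns →
      (ns.foldl (pvRelaxV comm du) st).1.contains v = true ∧
        (ns.foldl (pvRelaxV comm du) st).1.getD v 0 ≤ du + 1 := by
  intro ns
  induction ns with
  | nil => intro st hv; cases hv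
  | cons w t ih =>
    intro st hv
    rw [List.foldl_cons]
    rcases List.mem_cons.mp hv with hw | ht
    · subst hw
      have hone : (pvRelaxV comm du st v).1.contains v = true ∧
          (pvRelaxV comm du st v).1.getD v 0 ≤ du + 1 := by
        cases hc : (PySem.Set.contains comm v && (!(st.1.contains v) || decide (du + 1 < st.1.getD v 0))) with
        | true =>
          rw [pvRelaxV_true comm du st v hc]
          exact ⟨PySem.Dict.contains_insert_self st.1 v (du + 1),
            by rw [PySem.Dict.getD_insert_self st.1 v (du + 1) 0]⟩
        | false =>
          rw [pvRelaxV_false comm du st v hc]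
          have h2 := hc
          simp only [hcv, Bool.true_and, Bool.or_eq_false_iff, Bool.not_eq_false',
            decide_eq_false_iff_not, not_lt] at h2
          exact ⟨h2.1, h2.2⟩
      have hm := pvFoldlRel (fun a b : PySem.Dict Int Int × Bool => pvDLe a.1 b.1)
        (pvRelaxV comm du) (fun _ _ _ hab hbc => pvDLe_trans hab hbc)
        (fun s => pvDLe_refl s.1) (fun s x => pvRelaxV_mono comm du s x) t (pvRelaxV comm du st v)
      obtain ⟨hc2, hle2⟩ := hm v hone.1
      exact ⟨hc2, le_trans hle2 hone.2⟩
    · exact ih _ ht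

theorem pvFoldRelaxHit (community : List Int) (adj : List (Int × List Int)) (u v : Int)
    (K : Int) (hcv : PySem.Set.contains (PySem.Set.ofList community) v = true)
    (hv : v ∈ pvNbrs adj u) :
    ∀ (l : List Int) (st : PySem.Dict Int Int × Bool), u ∈ l →
      st.1.contains u = true → st.1.getD u 0 ≤ K →
      (l.foldl (pvRelaxU (PySem.Set.ofList community) adj) st).1.contains v = true ∧
        (l.foldl (pvRelaxU (PySem.Set.ofList community) adj) st).1.getD v 0 ≤ K + 1 := by
  intro l
  induction l with
  | nil => intro st hu; cases hu
  | cons w t ih =>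
    intro st hu hcu hgu
    rw [List.foldl_cons]
    rcases List.mem_cons.mp hu with hw | ht
    · subst hw
      have hstep : (pvRelaxU (PySem.Set.ofList community) adj st u).1.contains v = true ∧
          (pvRelaxU (PySem.Set.ofList community) adj st u).1.getD v 0 ≤ K + 1 := by
        unfold pvRelaxU
        rw [if_pos hcu]
        have hr := pvRelaxReach (PySem.Set.ofList community) (st.1.getD u 0) v hcv
          (pvNbrs adj u) st hv
        exact ⟨hr.1, le_trans hr.2 (by omega)⟩
      have hm := pvRoundFold_mono (PySem.Set.ofList community) adj t
        (pvRelaxU (PySem.Set.ofList community) adj st u)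
      obtain ⟨hc2, hle2⟩ := hm v hstep.1
      exact ⟨hc2, le_trans hle2 hstep.2⟩
    · have hm := pvRelaxU_mono (PySem.Set.ofList community) adj st w
      obtain ⟨hcu', hgu'⟩ := hm u hcu
      exact ih _ ht hcu' (le_trans hgu' hgu)

theorem pvRound_comp (community : List Int) (adj : List (Int × List Int)) (source : Int)
    (hs : source ∈ community) (k : Nat) (dist : PySem.Dict Int Int)
    (h : pvComp community adj source k dist) :
    pvComp community adj source (k + 1)
      (pvRound community (PySem.Set.ofList community) adj dist).1 := by
  intro j hj v hv
  have hmono : pvDLe dist (pvRound community (PySem.Set.ofList community) adj dist).1 := by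
    unfold pvRound
    exact pvRoundFold_mono (PySem.Set.ofList community) adj community (dist, false)
  by_cases hjk : j ≤ k
  · obtain ⟨hc1, hg1⟩ := h j hjk v hv
    obtain ⟨hc2, hg2⟩ := hmono v hc1
    exact ⟨hc2, le_trans hg2 hg1⟩
  · have hjeq : j = k + 1 := by omega
    subst hjeq
    have hv' : v ∈ (pvBLevel (PySem.Set.ofList community) adj
        (pvSt community adj source k).1 (pvSt community adj source k).2).2 := by
      simpa [pvSt] using hv
    obtain ⟨u, hu, hvn, hcv⟩ := pvBLevel_pred (PySem.Set.ofList community) adj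
      (pvSt community adj source k).1 (pvSt community adj source k).2 v hv'
    have huc : u ∈ community := by
      rcases pvSt_members community adj source k u (pvSt_sub community adj source k u hu) with h1 | h1
      · rw [h1]; exact hs
      · exact h1
    obtain ⟨hcu, hgu⟩ := h k (le_refl k) u hu
    have hhit := pvFoldRelaxHit community adj u v (k : Int) hcv hvn community
      (dist, false) huc hcu hgu
    refine ⟨hhit.1, ?_⟩
    have : ((k + 1 : Nat) : Int) = (k : Int) + 1 := by push_cast; ring
    rw [this]
    exact hhit.2

theorem pvIter_comp (community : List Int) (adj : List (Int × List Int)) (source : Int)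
    (hs : source ∈ community) :
    ∀ (m k : Nat) (dist : PySem.Dict Int Int),
      pvComp community adj source k dist →
      pvComp community adj source (k + m)
        (pvIter community (PySem.Set.ofList community) adj m dist) := by
  intro m
  induction m with
  | zero => intro k dist h; simpa [pvIter] using h
  | succ m ih =>
    intro k dist h
    simp only [pvIter]
    have h1 := pvRound_comp community adj source hs k dist h
    have h2 := ih (k + 1) _ h1
    have hidx : k + 1 + m = k + (m + 1) := by omega
    rw [hidx] at h2
    exact h2

-- the final Bellman-Ford dict for one source
def pvD (community : List Int) (adj : List (Int × List Int)) (source : Int) :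
    PySem.Dict Int Int :=
  pvIter community (PySem.Set.ofList community) adj community.length
    ((PySem.Dict.empty).insert source 0)

theorem pvD_sound (community : List Int) (adj : List (Int × List Int)) (source : Int) :
    pvSound community adj source (pvD community adj source) := by
  apply pvIter_sound
  intro v hv
  rw [PySem.Dict.contains_insert] at hv
  simp only [PySem.Dict.contains_empty, Bool.or_false, beq_iff_eq] at hv
  subst hv
  refine ⟨0, ?_, ?_⟩
  · rw [PySem.Dict.getD_insert_self]; rfl
  · simp [pvSt, pysem]

theorem pvD_comp (community : List Int) (adj : List (Int × List Int)) (source : Int)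
    (hs : source ∈ community) :
    pvComp community adj source community.length (pvD community adj source) := by
  have hbase : pvComp community adj source 0 ((PySem.Dict.empty).insert source 0) := by
    intro j hj v hv
    have hj0 : j = 0 := Nat.le_zero.mp hj
    subst hj0
    have hvs : v = source := by simpa [pvSt] using hv
    subst hvs
    refine ⟨PySem.Dict.contains_insert_self _ v 0, ?_⟩
    rw [PySem.Dict.getD_insert_self]
    simp
  have := pvIter_comp community adj source hs community.length 0
    ((PySem.Dict.empty).insert source 0) hbase
  simpa using this

theorem pvD_nodup (community : List Int) (adj : List (Int × List Int)) (source : Int) :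
    (pvD community adj source).keys.Nodup := by
  apply pvIter_nodup
  rw [PySem.Dict.keys_insert_of_not_contains _ 0 (PySem.Dict.contains_empty source)]
  simp [PySem.Dict.empty, PySem.Dict.keys]

theorem pvD_keys_perm (community : List Int) (adj : List (Int × List Int)) (source : Int)
    (hs : source ∈ community) :
    (pvD community adj source).keys.Perm (pvSt community adj source community.length).1 := by
  refine (List.perm_ext_iff_of_nodup (pvD_nodup community adj source)
    (pvSt_nodup community adj source community.length)).mpr ?_
  intro x
  constructor
  · intro hx
    have hcx : (pvD community adj source).contains x = true := by
      rw [PySem.Dict.contains_iff_mem_keys]; exact hx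
    obtain ⟨d, _, hd2⟩ := pvD_sound community adj source x hcx
    by_cases hdn : d ≤ community.length
    · exact pvSt_mem_mono community adj source hdn x hd2
    · have hstab := pvSt_empty_ge community adj source (le_of_lt (Nat.lt_of_not_le hdn))
        (pvSt_last community adj source hs)
      rw [hstab] at hd2
      exact hd2
  · intro hx
    obtain ⟨j, hj, hjx⟩ := pvSt_level community adj source community.length x hx
    obtain ⟨hc1, _⟩ := pvD_comp community adj source hs j hj x hjx
    rw [PySem.Dict.contains_iff_mem_keys] at hc1
    exact hc1

theorem pvD_getD_level (community : List Int) (adj : List (Int × List Int)) (source : Int)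
    (hs : source ∈ community) (j : Nat) (hj : j ≤ community.length) (v : Int)
    (hv : v ∈ (pvSt community adj source j).2) :
    (pvD community adj source).getD v 0 = (j : Int) := by
  obtain ⟨hc1, hg1⟩ := pvD_comp community adj source hs j hj v hv
  obtain ⟨d, hd1, hd2⟩ := pvD_sound community adj source v hc1
  have hdj : d ≤ j := by
    rw [hd1] at hg1
    exact_mod_cast hg1
  cases j with
  | zero =>
    have hd0 : d = 0 := Nat.le_zero.mp hdj
    rw [hd1, hd0]
  | succ j' =>
    have hfresh := pvSt_fresh community adj source j' v hv
    by_cases hdlt : d ≤ j'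
    · exact absurd (pvSt_mem_mono community adj source hdlt v hd2) hfresh
    · have hde : d = j' + 1 := by omega
      rw [hd1, hde]

theorem pvCondSum_D (community : List Int) (adj : List (Int × List Int)) (source : Int)
    (hs : source ∈ community) :
    pvCondSum source (pvD community adj source)
      = pvLS community adj source 0 community.length := by
  unfold pvCondSum
  rw [PySem.Dict.items_eq_map_keys (pvD community adj source) (pvD_nodup community adj source) 0,
    List.filter_map, List.map_map]
  have hfun1 : ((fun nd : Int × Int => nd.1 != source) ∘
      fun k => (k, (pvD community adj source).getD k 0)) = fun k => k != source := rfl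
  have hfun2 : (Prod.snd ∘ fun k => (k, (pvD community adj source).getD k 0))
      = fun k => (pvD community adj source).getD k 0 := rfl
  rw [hfun1, hfun2]
  have hperm := pvD_keys_perm community adj source hs
  rw [(((hperm.filter (fun k => k != source)).map
    (fun k => (pvD community adj source).getD k 0)).sum_eq)]
  have hmain : ∀ k, k ≤ community.length →
      ((((pvSt community adj source k).1).filter (fun v => v != source)).map
        (fun v => (pvD community adj source).getD v 0)).sum
        = pvLS community adj source 0 k := by
    intro k
    induction k with
    | zero =>
      intro _
      have h0 : (pvSt community adj source 0).1 = [source] := rfl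
      rw [h0]
      simp [pvLS]
    | succ k ih =>
      intro hk
      rw [pvSt_fst community adj source k, List.filter_append, List.map_append,
        List.sum_append, ih (Nat.le_of_succ_le hk)]
      have hval : ∀ v ∈ (pvSt community adj source (k + 1)).2,
          (pvD community adj source).getD v 0 = ((k + 1 : Nat) : Int) :=
        fun v hv => pvD_getD_level community adj source hs (k + 1) hk v hv
      have hneq : ∀ v ∈ (pvSt community adj source (k + 1)).2, (v != source) = true := by
        intro v hv
        have hfresh := pvSt_fresh community adj source k v hv
        have hsrc : source ∈ (pvSt community adj source k).1 :=
          pvSt_mem_mono community adj source (Nat.zero_le k) source (by simp [pvSt, pysem])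
        simp only [bne_iff_ne, ne_eq]
        intro heq
        rw [heq] at hfresh
        exact hfresh hsrc
      rw [List.filter_eq_self.mpr hneq,
        List.map_congr_left hval, PySem.List.sum_map_const_int]
      have hsplit := pvLS_split community adj source k 0 1
      have h1 : k + 1 = k + 1 := rfl
      rw [show (0 : Nat) + k = k from by omega] at hsplit
      rw [hsplit]
      simp only [pvLS]
      push_cast
      ring
  exact hmain community.length (le_refl _)

theorem pvPerSourceB (community : List Int) (adj : List (Int × List Int)) (source : Int)
    (hs : source ∈ community) (acc : Int) :
    pvBfsB (PySem.Set.ofList community) adj (community.length + 2)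
        (PySem.Set.ofList [source]) [source] 0 acc
      = acc + (pvD community adj source).items.foldl
          (fun s nd => if nd.1 ≠ source then s + nd.2 else s) 0 := by
  have hB := pvBfsB_LS community adj source (community.length + 2) 0 acc
  have h0 : ((0 : Nat) : Int) = 0 := by norm_num
  rw [h0] at hB
  have hL : pvBfsB (PySem.Set.ofList community) adj (community.length + 2)
      (PySem.Set.ofList [source]) [source] 0 acc
      = acc + pvLS community adj source 0 (community.length + 2) := hB
  have hsplit := pvLS_split community adj source community.length 0 2
  rw [show (0 : Nat) + community.length = community.length from by omega] at hsplit
  have hzero := pvLS_zero_of_empty community adj source 2 community.length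
    (pvSt_last community adj source hs)
  rw [hL, show community.length + 2 = community.length + 2 from rfl, hsplit, hzero]
  rw [pvItemsFold source _ 0]
  have hC : (((pvD community adj source).items.filter
      (fun nd => nd.1 != source)).map Prod.snd).sum = pvCondSum source (pvD community adj source) := rfl
  rw [hC, pvCondSum_D community adj source hs]
  ring

-- ===== VERDICT (by name: the statement is the Claim_ definition above) =====
theorem compute_rho_spec : Claim_equal_compute_rho := by
  unfold Claim_equal_compute_rho
  intro community adj _ _
  unfold Spec_compute_rho compute_rho compute_rho_alt
  apply PySem.List.foldl_congr_mem
  intro acc x hx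
  rw [pvPerSource community adj acc x, pvPerSourceB community adj x hx acc,
    pvBF_eq_iter]
  rfl
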